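-- pv_equiv track=rewrite | github.com/ericmerle3789/Collatz-Junction-Theorem | syracuse_jepa/pipeline/paradigm5_self_referential.py | cyclic_shift_cumulative
-- ===== SOURCE A (Python) =====
-- def cyclic_shift_cumulative(sigma, S):
--     """
--     Given cumulative exponents σ = (0, σ_1, ..., σ_{k-1}) with individual
--     exponents e_i = σ_i - σ_{i-1} (and e_k = S - σ_{k-1}),
--     compute the cumulative sequence starting from n_1 instead of n_0.
--
--     If individual exponents are (e_1, e_2, ..., e_k), cycling gives
--     (e_2, e_3, ..., e_k, e_1). The new cumulative sequence is
--     (0, e_2, e_2+e_3, ..., e_2+...+e_k, S) but we need σ_{k-1} < S,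
--     so the new σ' = (0, e_2, e_2+e_3, ..., e_2+...+e_k).
--     """
--     k = len(sigma)
--     # Individual exponents
--     indiv = [sigma[i] - sigma[i-1] for i in range(1, k)]
--     indiv.append(S - sigma[-1])  # last individual exponent e_k
--
--     # Cyclic shift: (e_2, e_3, ..., e_k, e_1)
--     shifted_indiv = indiv[1:] + [indiv[0]]
--
--     # New cumulative sequence
--     new_sigma = [0]
--     cumsum = 0
--     for e in shifted_indiv[:-1]:  # k-1 cumulative positions
--         cumsum += e
--         new_sigma.append(cumsum)
--
--     return tuple(new_sigma)
-- ===== SOURCE B (Python) =====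
-- def cyclic_shift_cumulative(sigma, S):
--     # Direct closed form: the build-indiv / rotate / cumsum pipeline telescopes,
--     # so each output is sigma[i] - sigma[1] (final entry S - sigma[1]).
--     k = len(sigma)
--     out = [0] + [sigma[i] - sigma[1] for i in range(2, k)]
--     if k >= 2:
--         out.append(S - sigma[1])
--     return tuple(out)
-- ===== Notes on version B (the rewrite author's own statement) =====
-- stated objective: simpler
-- what changed: The three-stage build-indiv / rotate / cumulative-sum pipeline telescopes, so B computes each output directly as sigma[i] - sigma[1] (final entry S - sigma[1]) in a single comprehension with no intermediate indiv/shifted/cumsum structures.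
import Mathlib
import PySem

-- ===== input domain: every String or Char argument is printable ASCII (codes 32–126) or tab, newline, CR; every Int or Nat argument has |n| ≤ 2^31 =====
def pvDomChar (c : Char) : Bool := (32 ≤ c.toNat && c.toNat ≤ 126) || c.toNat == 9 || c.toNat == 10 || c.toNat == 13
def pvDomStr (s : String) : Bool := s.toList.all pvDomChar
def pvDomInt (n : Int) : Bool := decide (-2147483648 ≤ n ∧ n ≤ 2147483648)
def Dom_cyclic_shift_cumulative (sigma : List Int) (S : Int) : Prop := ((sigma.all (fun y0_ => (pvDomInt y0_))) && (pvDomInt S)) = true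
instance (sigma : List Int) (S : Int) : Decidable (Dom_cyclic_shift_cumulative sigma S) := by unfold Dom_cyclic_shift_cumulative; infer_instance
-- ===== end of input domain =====

-- B replaces A's build-indiv / rotate / cumulative-sum pipeline by the telescoped
-- closed form sigma[i] - sigma[1] (objective: simpler). Return-value equivalence only.

-- ===== PORT A =====
def cyclic_shift_cumulative (sigma : List Int) (S : Int) : List Int :=
  let k : Int := sigma.length
  let indiv0 : List Int :=
    (PySem.List.pyRange 1 k 1).map
      (fun i => PySem.List.pyGetD sigma i 0 - PySem.List.pyGetD sigma (i - 1) 0)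
  let indiv : List Int := indiv0 ++ [S - PySem.List.pyGetD sigma (-1) 0]
  let shifted : List Int := PySem.List.slice indiv (some 1) none ++ [PySem.List.pyGetD indiv 0 0]
  let loop := (PySem.List.slice shifted none (some (-1))).foldl
      (fun (st : List Int × Int) e => (st.1 ++ [st.2 + e], st.2 + e)) ([0], 0)
  loop.1

-- ===== PORT B =====
def cyclic_shift_cumulative_alt (sigma : List Int) (S : Int) : List Int :=
  let k : Int := sigma.length
  let out : List Int :=
    [0] ++ (PySem.List.pyRange 2 k 1).map
      (fun i => PySem.List.pyGetD sigma i 0 - PySem.List.pyGetD sigma 1 0)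
  if 2 ≤ k then out ++ [S - PySem.List.pyGetD sigma 1 0] else out

-- ===== PRECONDITION & SPEC =====
-- Pre_ excludes only the empty list, on which A raises IndexError at sigma[-1].
def Pre_cyclic_shift_cumulative (sigma : List Int) (S : Int) : Prop := sigma ≠ []
instance (sigma : List Int) (S : Int) : Decidable (Pre_cyclic_shift_cumulative sigma S) := by
  unfold Pre_cyclic_shift_cumulative; infer_instance
def pvWitness_cyclic_shift_cumulative : List Int × Int := ([0, 2, 5], 9)

def Spec_cyclic_shift_cumulative (sigma : List Int) (S : Int) (out : List Int) : Prop := out = cyclic_shift_cumulative_alt sigma S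
instance (sigma : List Int) (S : Int) (out : List Int) : Decidable (Spec_cyclic_shift_cumulative sigma S out) := by unfold Spec_cyclic_shift_cumulative; infer_instance

-- ===== CLAIM (what is proved, stated in full; the proofs are below) =====
def Claim_equal_cyclic_shift_cumulative : Prop := ∀ (sigma : List Int) (S : Int), Dom_cyclic_shift_cumulative sigma S → Pre_cyclic_shift_cumulative sigma S → Spec_cyclic_shift_cumulative sigma S (cyclic_shift_cumulative sigma S)

-- ===== LEMMAS AND PROOFS =====

-- adjacent differences of a list (A's `indiv` before the appended last exponent)
def pvDiffs : List Int → List Int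
  | a :: b :: t => (b - a) :: pvDiffs (b :: t)
  | _ => []

-- running partial sums starting from accumulator c (what A's loop appends)
def pvPsums (c : Int) : List Int → List Int
  | [] => []
  | e :: t => (c + e) :: pvPsums (c + e) t

theorem pvLoop_eq (l : List Int) : ∀ (acc : List Int) (c : Int),
    (l.foldl (fun (st : List Int × Int) e => (st.1 ++ [st.2 + e], st.2 + e)) (acc, c)).1
      = acc ++ pvPsums c l := by
  induction l with
  | nil => intro acc c; simp [pvPsums]
  | cons e t ih =>
      intro acc c
      simp only [List.foldl_cons, pvPsums, ih]
      simp

theorem pvPsums_append_singleton (l : List Int) : ∀ (c x : Int),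
    pvPsums c (l ++ [x]) = pvPsums c l ++ [l.foldl (· + ·) c + x] := by
  induction l with
  | nil => intro c x; simp [pvPsums]
  | cons e t ih => intro c x; simp [pvPsums, ih]

theorem pvPsums_diffs (t : List Int) : ∀ (a c : Int),
    pvPsums c (pvDiffs (a :: t)) = t.map (fun x => x - a + c) := by
  induction t with
  | nil => intro a c; simp [pvDiffs, pvPsums]
  | cons b t' ih =>
      intro a c
      simp only [pvDiffs, pvPsums, ih, List.map_cons, List.cons.injEq]
      exact ⟨by ring, List.map_congr_left fun x _ => by ring⟩

theorem pvFoldl_diffs (t : List Int) : ∀ (a c : Int),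
    (pvDiffs (a :: t)).foldl (· + ·) c = c + (a :: t).getLast (by simp) - a := by
  induction t with
  | nil => intro a c; simp [pvDiffs]
  | cons b t' ih =>
      intro a c
      simp only [pvDiffs, List.foldl_cons, ih]
      rw [show (a :: b :: t').getLast (by simp) = (b :: t').getLast (by simp) from
        List.getLast_cons (by simp)]
      ring

theorem pvGetD_range_diffs (t : List Int) : ∀ (s : Int),
    (List.range t.length).map (fun j => t.getD j 0 - (s :: t).getD j 0) = pvDiffs (s :: t) := by
  induction t with
  | nil => intro s; simp [pvDiffs]
  | cons b t' ih =>
      intro s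
      simp only [List.length_cons]
      rw [List.range_succ_eq_map]
      simp only [List.map_cons, List.map_map]
      simp only [List.getD_cons_zero]
      rw [pvDiffs]
      exact congrArg _ (ih b)

theorem pvMap_pyRange_diffs (s : Int) (t : List Int) :
    (PySem.List.pyRange 1 ((s :: t).length : Int) 1).map
        (fun i => PySem.List.pyGetD (s :: t) i 0 - PySem.List.pyGetD (s :: t) (i - 1) 0)
      = pvDiffs (s :: t) := by
  rw [PySem.List.pyRange_one]
  have hn : (((s :: t).length : Int) - 1).toNat = t.length := by simp
  rw [hn, List.map_map]
  rw [← pvGetD_range_diffs t s]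
  apply List.map_congr_left
  intro j _
  have h1 : (1 : Int) + (j : Int) = ((j + 1 : Nat) : Int) := by push_cast; ring
  simp only [Function.comp_apply, h1, PySem.List.pyGetD_natCast]
  simp

theorem pvGetD_range_sub (t : List Int) : ∀ (c : Int),
    (List.range t.length).map (fun j => t.getD j 0 - c) = t.map (fun x => x - c) := by
  induction t with
  | nil => intro c; simp
  | cons b t' ih =>
      intro c
      simp only [List.length_cons]
      rw [List.range_succ_eq_map]
      simp only [List.map_cons, List.map_map]
      simp only [List.getD_cons_zero]
      exact congrArg _ (ih c)

theorem pvMap_pyRange_sub (s0 s1 : Int) (t : List Int) :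
    (PySem.List.pyRange 2 ((s0 :: s1 :: t).length : Int) 1).map
        (fun i => PySem.List.pyGetD (s0 :: s1 :: t) i 0 - s1)
      = t.map (fun x => x - s1) := by
  rw [PySem.List.pyRange_one]
  have hn : (((s0 :: s1 :: t).length : Int) - 2).toNat = t.length := by
    simp only [List.length_cons]; push_cast; omega
  rw [hn, List.map_map]
  rw [← pvGetD_range_sub t s1]
  apply List.map_congr_left
  intro j _
  have h1 : (2 : Int) + (j : Int) = ((j + 2 : Nat) : Int) := by push_cast; ring
  simp only [Function.comp_apply, h1, PySem.List.pyGetD_natCast]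
  simp

theorem pvGetD_one : ∀ (s0 s1 : Int) (t : List Int),
    PySem.List.pyGetD (s0 :: s1 :: t) 1 0 = s1 := by
  intro s0 s1 t
  rw [PySem.List.pyGetD_ofNat']
  rfl

theorem pvGetD_neg_one (s : Int) (t : List Int) :
    PySem.List.pyGetD (s :: t) (-1) 0 = (s :: t).getLast (by simp) := by
  have : PySem.List.pyGetD (s :: t) (-1) 0 = (PySem.List.pyGet? (s :: t) (-1)).getD 0 := rfl
  rw [this, PySem.List.pyGet?_neg_one, List.getLast?_eq_some_getLast]
  rfl

-- ===== VERDICT (by name: the statement is the Claim_ definition above) =====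
theorem cyclic_shift_cumulative_spec : Claim_equal_cyclic_shift_cumulative := by
  intro sigma S _ hpre
  unfold Spec_cyclic_shift_cumulative
  match sigma with
  | [] => exact absurd rfl hpre
  | [s0] =>
      show cyclic_shift_cumulative [s0] S = cyclic_shift_cumulative_alt [s0] S
      simp [cyclic_shift_cumulative, cyclic_shift_cumulative_alt,
        PySem.List.pyRange_one_eq_nil, PySem.List.slice_from_one,
        PySem.List.slice_to_neg_one]
  | s0 :: s1 :: t =>
      show cyclic_shift_cumulative (s0 :: s1 :: t) S = cyclic_shift_cumulative_alt (s0 :: s1 :: t) S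
      have hL : (s0 :: s1 :: t).getLast (by simp) = (s1 :: t).getLast (by simp) :=
        List.getLast_cons (by simp)
      unfold cyclic_shift_cumulative cyclic_shift_cumulative_alt
      simp only [pvGetD_one]
      simp only [pvMap_pyRange_diffs, pvMap_pyRange_sub, pvGetD_neg_one, hL]
      rw [pvDiffs]
      rw [PySem.List.slice_from_one]
      simp only [List.tail_cons, List.cons_append]
      rw [show PySem.List.pyGetD ((s1 - s0) :: (pvDiffs (s1 :: t) ++ [S - (s1 :: t).getLast (by simp)])) 0 0 = s1 - s0 from by
        rw [PySem.List.pyGetD_ofNat']; rfl]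
      rw [PySem.List.slice_to_neg_one]
      rw [show ((pvDiffs (s1 :: t) ++ [S - (s1 :: t).getLast (by simp)]) ++ [s1 - s0]).dropLast
            = pvDiffs (s1 :: t) ++ [S - (s1 :: t).getLast (by simp)] from by
        rw [List.dropLast_append_cons]; simp]
      rw [pvLoop_eq, pvPsums_append_singleton, pvPsums_diffs, pvFoldl_diffs]
      have h2 : (2 : Int) ≤ ((s0 :: s1 :: t).length : Int) := by simp; omega
      rw [if_pos h2]
      simp only [List.cons_append, List.nil_append]
      congr 1
      congr 1
      · exact List.map_congr_left fun x _ => by ring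
      · simp only [List.cons.injEq, and_true]
        ring
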